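-- pv_equiv track=rewrite | github.com/epsilon-less-than-0/autofolder | check_dict_values_cyclic.py | are_dict_values_same_up_to_cyclic_order
-- ===== SOURCE A (Python) =====
-- def are_dict_values_same_up_to_cyclic_order(dict1, dict2):
--     if len(dict1) != len(dict2):
--         return False
--
--     # Check each key-value pair in dict1
--     for key, value1 in dict1.items():
--         # Check if the corresponding key exists in dict2
--         if key not in dict2:
--             return False
--
--         value2 = dict2[key]
--
--         # Check if the values are lists
--         if not isinstance(value1, list) or not isinstance(value2, list):
--             return False
--
--         # Check if the lists are the same up to cyclic order
--         if not are_lists_same_up_to_cyclic_order(value1, value2):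
--             return False
--
--     return True
--
-- def are_lists_same_up_to_cyclic_order(list1, list2):
--     if len(list1) != len(list2):
--         return False
--
--     # Create all cyclic permutations of list1
--     n = len(list1)
--     for i in range(n):
--         if all(list1[(j + i) % n] == list2[j] for j in range(n)):
--             return True
--     return False
-- ===== SOURCE B (Python) =====
-- def are_dict_values_same_up_to_cyclic_order(dict1, dict2):
--     # Compare the key sets once, then check each value pair by Rabin-Karp:
--     # a rolling hash over the rotations filters candidates, which are verified directly
--     # (alternative algorithm; not claimed faster).
--     if dict1.keys() != dict2.keys():
--         return False
--     return all(_cyclic_equal(v, dict2[k]) for k, v in dict1.items())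
--
-- def _cyclic_equal(list1, list2):
--     # Rolling-hash (Rabin-Karp) scan over the n rotations of list1: the hash of the
--     # window is updated in O(1) per shift and only hash hits are compared elementwise.
--     n = len(list1)
--     if len(list2) != n or n == 0:
--         # n == 0: there are no rotations to try (as in the original).
--         return False
--     M = (1 << 61) - 1
--     B = 1 << 33
--     target = 0
--     for x in list2:
--         target = (target * B + x) % M
--     cur = 0
--     for x in list1:
--         cur = (cur * B + x) % M
--     top = pow(B, n - 1, M)
--     for i in range(n):
--         if cur == target and list1[i:] + list1[:i] == list2:
--             return True
--         a = list1[i]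
--         cur = ((cur - a * top) * B + a) % M
--     return False
-- ===== Notes on version B (the rewrite author's own statement) =====
-- stated objective: alternative
-- what changed: B compares the key sets once and replaces A's all-rotations elementwise comparison by a Rabin-Karp scan: a modular rolling hash of the current rotation is updated in O(1) per shift and only hash hits are verified by one direct list comparison.
import Mathlib
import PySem

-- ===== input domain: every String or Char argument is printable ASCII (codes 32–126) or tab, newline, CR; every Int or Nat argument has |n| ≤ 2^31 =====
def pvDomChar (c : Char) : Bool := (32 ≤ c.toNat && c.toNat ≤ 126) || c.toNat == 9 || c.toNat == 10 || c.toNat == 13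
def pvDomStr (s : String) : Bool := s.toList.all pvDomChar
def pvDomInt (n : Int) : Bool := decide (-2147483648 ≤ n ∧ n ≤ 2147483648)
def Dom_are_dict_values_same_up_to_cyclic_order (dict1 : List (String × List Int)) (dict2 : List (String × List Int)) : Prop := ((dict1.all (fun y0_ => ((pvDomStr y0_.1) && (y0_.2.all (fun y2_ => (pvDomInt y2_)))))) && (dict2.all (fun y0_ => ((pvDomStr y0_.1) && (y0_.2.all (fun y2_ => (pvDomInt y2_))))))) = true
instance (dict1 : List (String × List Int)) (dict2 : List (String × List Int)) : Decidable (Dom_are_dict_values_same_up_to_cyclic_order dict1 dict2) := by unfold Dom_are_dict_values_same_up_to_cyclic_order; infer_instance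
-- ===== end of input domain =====

-- B replaces A's per-key membership test + all-rotations elementwise comparison by one key-set
-- comparison and a Rabin-Karp scan: a modular rolling hash over the rotations of list1 filters
-- candidates, which are verified by one direct list comparison (alternative algorithm, not timed faster).


-- ===== PORT A =====
-- Port note: Python A receives dicts; the assoc-list arguments are normalized with
-- PySem.Dict.ofList (last value wins, first position), as dict(...) does.
-- The isinstance(list) checks are always true under the typed signature.

-- are_lists_same_up_to_cyclic_order (A)
def pvCycA (list1 : List Int) (list2 : List Int) : Bool :=
  if PySem.List.len list1 != PySem.List.len list2 then false
  else
    let n : Int := PySem.List.len list1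
    (PySem.List.pyRange 0 n 1).any (fun i =>
      (PySem.List.pyRange 0 n 1).all (fun j =>
        PySem.List.pyGet? list1 (PySem.Int.mod (j + i) n) == PySem.List.pyGet? list2 j))

-- the for-loop over dict1.items() with early returns
def pvGoA (d2 : PySem.Dict String (List Int)) : List (String × (List Int)) → Bool
  | [] => true
  | (key, value1) :: rest =>
    match d2.get? key with
    | none => false            -- 'if key not in dict2: return False'
    | some value2 =>
      if !pvCycA value1 value2 then false else pvGoA d2 rest

def are_dict_values_same_up_to_cyclic_order (dict1 : List (String × List Int)) (dict2 : List (String × List Int)) : Bool :=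
  let d1 := PySem.Dict.ofList dict1
  let d2 := PySem.Dict.ofList dict2
  if d1.size != d2.size then false
  else pvGoA d2 d1.items

-- ===== PORT B =====
-- _cyclic_equal (B): Rabin-Karp over the n rotations of list1.
-- 'target = 0; for x in list2: target = (target*B + x) % M'  (and the same for list1):
def pvHashB (xs : List Int) : Int :=
  xs.foldl (fun v x => PySem.Int.mod (v * 8589934592 + x) 2305843009213693951) 0

-- 'for i in range(n): if cur == target and list1[i:]+list1[:i] == list2: return True; …'
-- list1[i] is read with pyGetD (i ranges over range(n), so always in range — exact).
def pvLoopB (list1 : List Int) (list2 : List Int) (top : Int) (target : Int) :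
    List Int → Int → Bool
  | [], _ => false
  | i :: rest, cur =>
    if cur == target &&
        (PySem.List.slice list1 (some i) none ++ PySem.List.slice list1 none (some i) == list2)
      then true
    else
      let a := PySem.List.pyGetD list1 i 0
      pvLoopB list1 list2 top target rest
        (PySem.Int.mod ((cur - a * top) * 8589934592 + a) 2305843009213693951)

def pvCycB (list1 : List Int) (list2 : List Int) : Bool :=
  let n : Int := PySem.List.len list1
  if PySem.List.len list2 != n || n == 0 then false
  else
    let target := pvHashB list2
    let cur := pvHashB list1
    -- pow(B, n-1, M); the guard ensures n ≥ 1, so (n-1).toNat is exact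
    let top := PySem.Int.mod (8589934592 ^ (n - 1).toNat) 2305843009213693951
    pvLoopB list1 list2 top target (PySem.List.pyRange 0 n 1) cur

def are_dict_values_same_up_to_cyclic_order_alt (dict1 : List (String × List Int)) (dict2 : List (String × List Int)) : Bool :=
  let d1 := PySem.Dict.ofList dict1
  let d2 := PySem.Dict.ofList dict2
  if !PySem.Set.equal d1.keys d2.keys then false
  else d1.items.all (fun p => pvCycB p.2 (d2.getD p.1 []))

-- ===== PRECONDITION & SPEC =====
def Spec_are_dict_values_same_up_to_cyclic_order (dict1 : List (String × List Int)) (dict2 : List (String × List Int)) (out : Bool) : Prop := out = are_dict_values_same_up_to_cyclic_order_alt dict1 dict2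
instance (dict1 : List (String × List Int)) (dict2 : List (String × List Int)) (out : Bool) : Decidable (Spec_are_dict_values_same_up_to_cyclic_order dict1 dict2 out) := by unfold Spec_are_dict_values_same_up_to_cyclic_order; infer_instance

-- ===== CLAIM (what is proved, stated in full; the proofs are below) =====
def Claim_equal_are_dict_values_same_up_to_cyclic_order : Prop := ∀ (dict1 : List (String × List Int)) (dict2 : List (String × List Int)), Dom_are_dict_values_same_up_to_cyclic_order dict1 dict2 → Spec_are_dict_values_same_up_to_cyclic_order dict1 dict2 (are_dict_values_same_up_to_cyclic_order dict1 dict2)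

-- ===== LEMMAS AND PROOFS =====

-- rotation of l by i places
def pvRot (l : List Int) (i : Nat) : List Int := l.drop i ++ l.take i

-- the plain (un-reduced) base-2^33 encoding, and its generalized fold
def pvEncF (v : Int) (xs : List Int) : Int := xs.foldl (fun v x => v * 8589934592 + x) v
def pvEnc (xs : List Int) : Int := pvEncF 0 xs

lemma pvEncF_eq (v : Int) (xs : List Int) :
    pvEncF v xs = v * 8589934592 ^ xs.length + pvEnc xs := by
  induction xs generalizing v with
  | nil => simp [pvEncF, pvEnc]
  | cons x t ih =>
    show pvEncF (v * 8589934592 + x) t = _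
    rw [ih]
    have hx : pvEnc (x :: t) = pvEncF x t := by simp [pvEnc, pvEncF]
    rw [hx, ih x]
    simp [pow_succ]
    ring

lemma pvEnc_cons (a : Int) (t : List Int) :
    pvEnc (a :: t) = a * 8589934592 ^ t.length + pvEnc t := by
  have : pvEnc (a :: t) = pvEncF a t := by simp [pvEnc, pvEncF]
  rw [this, pvEncF_eq]

lemma pvEnc_snoc (t : List Int) (a : Int) :
    pvEnc (t ++ [a]) = pvEnc t * 8589934592 + a := by
  simp [pvEnc, pvEncF, List.foldl_append]

lemma pvHashStep (v x : Int) :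
    PySem.Int.mod (v * 8589934592 + x) 2305843009213693951
      = (v * 8589934592 + x) % 2305843009213693951 :=
  PySem.Int.mod_eq_emod_of_pos (by norm_num)

lemma pvHashFold_gen (xs : List Int) : ∀ v : Int,
    xs.foldl (fun v x => PySem.Int.mod (v * 8589934592 + x) 2305843009213693951)
        (v % 2305843009213693951)
      = pvEncF v xs % 2305843009213693951 := by
  induction xs with
  | nil => intro v; simp [pvEncF]
  | cons x t ih =>
    intro v
    have hme : ((v % 2305843009213693951) * 8589934592 + x) % 2305843009213693951
        = (v * 8589934592 + x) % 2305843009213693951 := by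
      have h1 : Int.ModEq 2305843009213693951 (v % 2305843009213693951) v :=
        Int.emod_emod_of_dvd v dvd_rfl
      exact (h1.mul_right 8589934592).add_right x
    show List.foldl _ (PySem.Int.mod ((v % 2305843009213693951) * 8589934592 + x) _) t = _
    rw [pvHashStep, hme, ih (v * 8589934592 + x)]
    rfl

-- pvHashB computes pvEnc reduced mod M
lemma pvHashB_eq (xs : List Int) : pvHashB xs = pvEnc xs % 2305843009213693951 := by
  have := pvHashFold_gen xs 0
  simpa [pvHashB, pvEnc] using this

-- rolling update: for s < l.length,
-- pvEnc (pvRot l (s+1)) = (pvEnc (pvRot l s) - l[s] * 8589934592^(l.length-1)) * 8589934592 + l[s]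
lemma pvRot_update (l : List Int) (s : Nat) (hs : s < l.length) :
    pvEnc (pvRot l (s + 1))
      = (pvEnc (pvRot l s) - l[s] * 8589934592 ^ (l.length - 1)) * 8589934592 + l[s] := by
  have hd : l.drop s = l[s] :: l.drop (s + 1) := List.drop_eq_getElem_cons hs
  have ht : l.take (s + 1) = l.take s ++ [l[s]] := by
    rw [List.take_add_one, List.getElem?_eq_getElem hs]
    rfl
  have hlen : (l.drop (s + 1) ++ l.take s).length = l.length - 1 := by
    simp; omega
  have hrotS : pvEnc (pvRot l s)
      = l[s] * 8589934592 ^ (l.length - 1) + pvEnc (l.drop (s + 1) ++ l.take s) := by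
    unfold pvRot
    rw [hd]
    have : (l[s] :: l.drop (s + 1)) ++ l.take s = l[s] :: (l.drop (s + 1) ++ l.take s) := rfl
    rw [this, pvEnc_cons, hlen]
  have hrotS1 : pvEnc (pvRot l (s + 1))
      = pvEnc (l.drop (s + 1) ++ l.take s) * 8589934592 + l[s] := by
    unfold pvRot
    rw [ht, ← List.append_assoc, pvEnc_snoc]
  rw [hrotS1, hrotS]
  ring

lemma rot_get (l : List Int) (i j : Nat) (hi : i ≤ l.length) (hj : j < l.length) :
    (l.drop i ++ l.take i)[j]? = l[(j + i) % l.length]? := by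
  rw [List.getElem?_append]
  by_cases h : j < (l.drop i).length
  · simp only [if_pos h, List.getElem?_drop]
    have : (j + i) % l.length = i + j := by
      simp at h; rw [Nat.mod_eq_of_lt (by omega)]; omega
    rw [this]
  · simp only [if_neg h]
    simp at h
    rw [List.getElem?_take_of_lt (by simp at h ⊢; omega)]
    have : (j + i) % l.length = j - (l.drop i).length := by
      simp at h ⊢
      have : (j+i) - l.length < l.length := by omega
      rw [Nat.mod_eq_sub_mod (by omega), Nat.mod_eq_of_lt this]
      omega
    rw [this]

lemma cyc_at (l1 l2 : List Int) (hn : l1.length = l2.length) (i : Nat) (hi : i < l1.length) :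
    ((List.range l1.length).all (fun j => l1[(j + i) % l1.length]? == l2[j]?))
      = (l1.drop i ++ l1.take i == l2) := by
  rw [Bool.eq_iff_iff]
  simp only [List.all_eq_true, List.mem_range, beq_iff_eq]
  constructor
  · intro h
    apply List.ext_getElem?_iff.mpr
    intro j
    by_cases hj : j < l1.length
    · rw [rot_get l1 i j (le_of_lt hi) hj]; exact h j hj
    · rw [List.getElem?_eq_none (by simp; omega), List.getElem?_eq_none (by omega)]
  · intro h j hj
    rw [← rot_get l1 i j (le_of_lt hi) hj, h]

-- A-side: pvCycA decides "some rotation of list1 equals list2"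
lemma pvCycA_iff (l1 l2 : List Int) :
    pvCycA l1 l2 = decide (l1.length = l2.length ∧ ∃ i < l1.length, pvRot l1 i = l2) := by
  unfold pvCycA
  simp only [PySem.List.len_eq]
  by_cases hn : l1.length = l2.length
  · have hbne : ((l1.length : Int) != (l2.length : Int)) = false := by simp [hn]
    rw [hbne]
    simp only [Bool.false_eq_true, if_false]
    rw [PySem.List.pyRange_zero_natCast, List.any_map]
    have hmain : ∀ i ∈ List.range l1.length,
        ((fun i : Int => ((List.range l1.length).map (fun k : Nat => (k : Int))).all fun j =>
            PySem.List.pyGet? l1 (PySem.Int.mod (j + i) (l1.length : Int)) ==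
              PySem.List.pyGet? l2 j) ∘ (fun k : Nat => (k : Int))) i
          = (pvRot l1 i == l2) := by
      intro i hi
      simp only [List.mem_range] at hi
      simp only [Function.comp]
      rw [List.all_map]
      rw [show pvRot l1 i = l1.drop i ++ l1.take i from rfl, ← cyc_at l1 l2 hn i hi]
      apply List.all_congr rfl
      intro j
      simp only [Function.comp, PySem.List.pyGet?_natCast]
      have : (j : Int) + (i : Int) = ((j + i : Nat) : Int) := by push_cast; ring
      rw [this, PySem.Int.mod_natCast, PySem.List.pyGet?_natCast]
    rw [PySem.List.any_congr_mem hmain, Bool.eq_iff_iff]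
    simp only [List.any_eq_true, List.mem_range, beq_iff_eq, decide_eq_true_eq]
    exact ⟨fun ⟨i, hi, h⟩ => ⟨hn, i, hi, h⟩, fun ⟨_, i, hi, h⟩ => ⟨i, hi, h⟩⟩
  · have hbne : ((l1.length : Int) != (l2.length : Int)) = true := by
      simp only [bne_iff_ne, ne_eq, Nat.cast_inj]; exact hn
    rw [if_pos hbne]
    symm
    simp only [decide_eq_false_iff_not, not_and]
    exact fun h => absurd h hn

lemma pvLoopB_spec (l1 l2 : List Int) (s : Nat) (hs : s ≤ l1.length) :
    pvLoopB l1 l2 (PySem.Int.mod (8589934592 ^ (l1.length - 1)) 2305843009213693951)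
        (pvEnc l2 % 2305843009213693951)
        ((List.range' s (l1.length - s)).map (fun k : Nat => (k : Int)))
        (pvEnc (pvRot l1 s) % 2305843009213693951)
      = decide (∃ j < l1.length, s ≤ j ∧ pvRot l1 j = l2) := by
  obtain ⟨m, hm⟩ : ∃ m, l1.length - s = m := ⟨_, rfl⟩
  induction m generalizing s with
  | zero =>
    have hse : s = l1.length := by omega
    rw [hm]
    simp only [List.range'_zero, List.map_nil, pvLoopB]
    symm
    simp only [decide_eq_false_iff_not]
    rintro ⟨j, hj1, hj2, -⟩
    omega
  | succ m ih =>
    have hslt : s < l1.length := by omega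
    rw [hm, List.range'_succ, List.map_cons]
    simp only [pvLoopB]
    rw [PySem.List.slice_from_natCast, PySem.List.slice_to_natCast]
    by_cases hrot : pvRot l1 s = l2
    · have hc : ((l1.drop s ++ l1.take s : List Int) == l2) = true := by
        rw [beq_iff_eq]; exact hrot
      have hh : ((pvEnc (pvRot l1 s) % 2305843009213693951 : Int) ==
          pvEnc l2 % 2305843009213693951) = true := by
        rw [beq_iff_eq, hrot]
      rw [hc, hh]
      simp only [Bool.and_self, if_true]
      symm
      simp only [decide_eq_true_eq]
      exact ⟨s, hslt, le_refl s, hrot⟩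
    · have hc : ((l1.drop s ++ l1.take s : List Int) == l2) = false := by
        rw [beq_eq_false_iff_ne]; exact hrot
      rw [hc]
      simp only [Bool.and_false, Bool.false_eq_true, if_false]
      have ha : PySem.List.pyGetD l1 ((s : Nat) : Int) 0 = l1[s] := by
        rw [PySem.List.pyGetD_natCast, List.getD_eq_getElem l1 0 hslt]
      rw [ha]
      have hnew : PySem.Int.mod
          ((pvEnc (pvRot l1 s) % 2305843009213693951 -
              l1[s] * PySem.Int.mod (8589934592 ^ (l1.length - 1)) 2305843009213693951) *
            8589934592 + l1[s]) 2305843009213693951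
          = pvEnc (pvRot l1 (s + 1)) % 2305843009213693951 := by
        rw [PySem.Int.mod_eq_emod_of_pos (b := (2305843009213693951 : Int)) (by norm_num),
            PySem.Int.mod_eq_emod_of_pos (b := (2305843009213693951 : Int)) (by norm_num)]
        have h1 : Int.ModEq 2305843009213693951
            (pvEnc (pvRot l1 s) % 2305843009213693951) (pvEnc (pvRot l1 s)) :=
          Int.emod_emod_of_dvd _ dvd_rfl
        have h2 : Int.ModEq 2305843009213693951
            ((8589934592 : Int) ^ (l1.length - 1) % 2305843009213693951)
            ((8589934592 : Int) ^ (l1.length - 1)) :=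
          Int.emod_emod_of_dvd _ dvd_rfl
        have hme := ((h1.sub (h2.mul_left l1[s])).mul_right 8589934592).add_right l1[s]
        rw [hme, ← pvRot_update l1 s hslt]
      have hm' : l1.length - (s + 1) = m := by omega
      have hih := ih (s + 1) (by omega) hm'
      rw [hm'] at hih
      rw [hnew, hih]
      apply decide_eq_decide.mpr
      constructor
      · rintro ⟨j, hj1, hj2, hj3⟩
        refine ⟨j, hj1, ?_, hj3⟩
        omega
      · rintro ⟨j, hj1, hj2, hj3⟩
        refine ⟨j, hj1, ?_, hj3⟩
        rcases Nat.lt_or_ge s j with h | h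
        · omega
        · exfalso; have : j = s := by omega
          exact hrot (this ▸ hj3)

-- B-side: pvCycB decides the same predicate
lemma pvCycB_iff (l1 l2 : List Int) :
    pvCycB l1 l2 = decide (l1.length = l2.length ∧ ∃ i < l1.length, pvRot l1 i = l2) := by
  unfold pvCycB
  simp only [PySem.List.len_eq]
  by_cases hn : l1.length = l2.length
  · by_cases h0 : l1.length = 0
    · have hg : (((l2.length : Int) != (l1.length : Int)) || ((l1.length : Int) == 0)) = true := by
        have h2 : l2.length = 0 := by omega
        simp [h0, h2]
      rw [if_pos hg]
      symm
      simp only [decide_eq_false_iff_not, not_and]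
      rintro - ⟨i, hi, -⟩
      omega
    · have hg : (((l2.length : Int) != (l1.length : Int)) || ((l1.length : Int) == 0)) = false := by
        have h2 : l2 ≠ [] := by
          intro h
          apply h0
          rw [hn, h]
          rfl
        simp [hn, h2]
      rw [hg]
      simp only [Bool.false_eq_true, if_false]
      have htop : (((l1.length : Int) - 1).toNat) = l1.length - 1 := by omega
      have hcur : pvHashB l1 = pvEnc (pvRot l1 0) % 2305843009213693951 := by
        rw [pvHashB_eq]; simp [pvRot]
      rw [htop, pvHashB_eq l2, hcur, PySem.List.pyRange_zero_natCast, List.range_eq_range']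
      have hsp := pvLoopB_spec l1 l2 0 (Nat.zero_le _)
      rw [Nat.sub_zero] at hsp
      rw [hsp]
      apply decide_eq_decide.mpr
      constructor
      · rintro ⟨j, hj2, -, hj3⟩; exact ⟨hn, j, hj2, hj3⟩
      · rintro ⟨-, j, hj2, hj3⟩; exact ⟨j, hj2, Nat.zero_le _, hj3⟩
  · have hg : (((l2.length : Int) != (l1.length : Int)) || ((l1.length : Int) == 0)) = true := by
      have : ((l2.length : Int) != (l1.length : Int)) = true := by
        simp only [bne_iff_ne, ne_eq, Nat.cast_inj]
        exact fun h => hn h.symm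
      simp [this]
    rw [if_pos hg]
    symm
    simp only [decide_eq_false_iff_not, not_and]
    exact fun h => absurd h hn

lemma pvCyc_eq (l1 l2 : List Int) : pvCycA l1 l2 = pvCycB l1 l2 := by
  rw [pvCycA_iff, pvCycB_iff]

lemma pvGoA_eq_all (d2 : PySem.Dict String (List Int)) (l : List (String × List Int)) :
    pvGoA d2 l = l.all (fun p => d2.contains p.1 && pvCycA p.2 (d2.getD p.1 [])) := by
  induction l with
  | nil => rfl
  | cons p rest ih =>
    obtain ⟨k, v1⟩ := p
    simp only [pvGoA, List.all_cons]
    cases hg : d2.get? k with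
    | none =>
      have : d2.contains k = false := by
        rw [PySem.Dict.contains_eq_isSome_get?, hg]; rfl
      simp [this]
    | some v2 =>
      have hc : d2.contains k = true := by
        rw [PySem.Dict.contains_eq_isSome_get?, hg]; rfl
      have hd : d2.getD k [] = v2 := PySem.Dict.getD_of_get?_eq_some d2 [] hg
      cases hcy : pvCycA v1 v2 <;> simp [hc, hd, hcy, ih]

lemma pv_top_eq (dict1 dict2 : List (String × List Int)) : are_dict_values_same_up_to_cyclic_order dict1 dict2 = are_dict_values_same_up_to_cyclic_order_alt dict1 dict2 := by
  unfold are_dict_values_same_up_to_cyclic_order are_dict_values_same_up_to_cyclic_order_alt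
  dsimp only
  have hnd1 : (PySem.Dict.ofList dict1).keys.Nodup := PySem.Dict.nodup_keys_ofList dict1
  have hnd2 : (PySem.Dict.ofList dict2).keys.Nodup := PySem.Dict.nodup_keys_ofList dict2
  set d1 := PySem.Dict.ofList dict1 with hd1
  set d2 := PySem.Dict.ofList dict2 with hd2
  have hk1 : d1.keys.length = d1.size := by simp [PySem.Dict.keys, PySem.Dict.size]
  have hk2 : d2.keys.length = d2.size := by simp [PySem.Dict.keys, PySem.Dict.size]
  rw [pvGoA_eq_all]
  by_cases hsz : d1.size = d2.size
  · by_cases hall : ∀ p ∈ d1.items, d2.contains p.1 = true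
    · have hsub : d1.keys ⊆ d2.keys := by
        intro k hk
        simp only [PySem.Dict.keys, List.mem_map] at hk
        obtain ⟨p, hp, hpk⟩ := hk
        exact (PySem.Dict.contains_iff_mem_keys _ _).mp (hpk ▸ hall p hp)
      have hperm : d1.keys.Perm d2.keys :=
        (List.subperm_of_subset hnd1 hsub).perm_of_length_le (by omega)
      have heq : PySem.Set.equal d1.keys d2.keys = true :=
        (PySem.Set.equal_iff _ _).mpr (fun x => hperm.mem_iff)
      simp only [hsz, bne_self_eq_false, Bool.false_eq_true, if_false, heq, Bool.not_true]
      rw [Bool.eq_iff_iff]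
      simp only [List.all_eq_true]
      constructor
      · intro h p hp
        have := h p hp
        rw [hall p hp, pvCyc_eq] at this
        simpa using this
      · intro h p hp
        rw [hall p hp, pvCyc_eq]
        simpa using h p hp
    · push Not at hall
      obtain ⟨p, hp, hpc⟩ := hall
      have hpc' : d2.contains p.1 = false := by
        cases h : d2.contains p.1
        · rfl
        · exact absurd h hpc
      have hA : (d1.items.all fun p => d2.contains p.1 && pvCycA p.2 (d2.getD p.1 [])) = false := by
        rw [List.all_eq_false]
        exact ⟨p, hp, by simp [hpc']⟩
      have hB : PySem.Set.equal d1.keys d2.keys = false := by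
        cases h : PySem.Set.equal d1.keys d2.keys
        · rfl
        · exfalso
          have hm := ((PySem.Set.equal_iff _ _).mp h p.1).mp
          have : p.1 ∈ d1.keys := by
            simp only [PySem.Dict.keys, List.mem_map]; exact ⟨p, hp, rfl⟩
          have := (PySem.Dict.contains_iff_mem_keys _ _).mpr (hm this)
          rw [hpc'] at this; cases this
      simp [hsz, hA, hB]
  · have hB : PySem.Set.equal d1.keys d2.keys = false := by
      cases h : PySem.Set.equal d1.keys d2.keys
      · rfl
      · exfalso
        have hperm : d1.keys.Perm d2.keys :=
          (List.perm_ext_iff_of_nodup hnd1 hnd2).mpr (fun a => (PySem.Set.equal_iff _ _).mp h a)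
        have := hperm.length_eq
        omega
    have hsz' : (d1.size != d2.size) = true := by simp [bne_iff_ne, hsz]
    simp [hsz', hB]

-- ===== VERDICT (by name: the statement is the Claim_ definition above) =====
theorem are_dict_values_same_up_to_cyclic_order_spec : Claim_equal_are_dict_values_same_up_to_cyclic_order := by
  intro dict1 dict2 _
  unfold Spec_are_dict_values_same_up_to_cyclic_order
  exact pv_top_eq dict1 dict2
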